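-- pv_equiv track=rewrite | github.com/01090841589/solved_problem | 20190715_0719/20190715_D2숫자배열회전.py | cal_mat
-- ===== SOURCE A (Python) =====
-- def cal_mat(matrix) :
--     matrix_90 = []
--     matrix_180 = []
--     matrix_270 = []
--     num = ''
--     for i in range(len(matrix)) :
--         for j in range(len(matrix)) :
--             num += matrix[len(matrix)-1-j][i]
--         matrix_90.append(num)
--         num = ''
--     for i in range(len(matrix)) :
--         for j in range(len(matrix)) :
--             num += matrix[len(matrix)-1-i][len(matrix)-1-j]
--         matrix_180.append(num)
--         num = ''
--     for i in range(len(matrix)) :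
--         for j in range(len(matrix)) :
--             num += matrix[j][len(matrix)-1-i]
--         matrix_270.append(num)
--         num = ''
--     return matrix_90,matrix_180,matrix_270
-- ===== SOURCE B (Python) =====
-- def cal_mat(matrix):
--     def rotate(m):
--         return [''.join(row[i] for row in reversed(m)) for i in range(len(m))]
--     r90 = rotate(matrix)
--     r180 = rotate(r90)
--     r270 = rotate(r180)
--     return r90, r180, r270
-- ===== Notes on version B (the rewrite author's own statement) =====
-- stated objective: simpler
-- what changed: B defines a single 90-degree rotate helper and applies it three times in a chain (r90, rotate(r90), rotate(r180)) instead of A's three independent index-arithmetic double loops with a string accumulator.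
import Mathlib
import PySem

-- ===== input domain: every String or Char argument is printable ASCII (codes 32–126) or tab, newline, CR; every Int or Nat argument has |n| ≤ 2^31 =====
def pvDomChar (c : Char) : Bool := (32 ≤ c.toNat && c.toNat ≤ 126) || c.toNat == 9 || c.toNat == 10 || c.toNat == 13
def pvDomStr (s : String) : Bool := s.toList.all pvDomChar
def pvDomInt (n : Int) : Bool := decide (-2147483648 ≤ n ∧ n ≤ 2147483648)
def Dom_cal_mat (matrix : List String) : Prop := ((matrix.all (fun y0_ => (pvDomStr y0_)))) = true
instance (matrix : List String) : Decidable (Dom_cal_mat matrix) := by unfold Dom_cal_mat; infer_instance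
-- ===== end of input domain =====

-- B computes the 90° rotation once and applies it three times in a chain, replacing A's
-- three independent index-arithmetic double loops (objective: simpler decomposition).

-- ===== PORT A =====
-- matrix[r][c]: total stand-in for Python's indexing; exact whenever r < matrix.length and
-- c < (matrix[r]).length, which Pre_cal_mat guarantees for every access A performs.
def pvGetC (m : List String) (r c : Nat) : Char := ((m.getD r "").toList).getD c ' '

def cal_mat (matrix : List String) : List String × List String × List String :=
  let n := matrix.length
  let matrix_90 := (List.range n).foldl (fun acc i =>
    acc ++ [String.ofList ((List.range n).foldl (fun num j => num ++ [pvGetC matrix (n-1-j) i]) [])]) []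
  let matrix_180 := (List.range n).foldl (fun acc i =>
    acc ++ [String.ofList ((List.range n).foldl (fun num j => num ++ [pvGetC matrix (n-1-i) (n-1-j)]) [])]) []
  let matrix_270 := (List.range n).foldl (fun acc i =>
    acc ++ [String.ofList ((List.range n).foldl (fun num j => num ++ [pvGetC matrix j (n-1-i)]) [])]) []
  (matrix_90, matrix_180, matrix_270)

-- ===== PORT B =====
-- rotate(m) = [''.join(row[i] for row in reversed(m)) for i in range(len(m))]
def pvRotate (m : List String) : List String :=
  (List.range m.length).map (fun i => String.ofList (m.reverse.map (fun row => row.toList.getD i ' ')))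

def cal_mat_alt (matrix : List String) : List String × List String × List String :=
  let r90 := pvRotate matrix
  let r180 := pvRotate r90
  let r270 := pvRotate r180
  (r90, r180, r270)

-- ===== PRECONDITION & SPEC =====
-- Exactly the inputs on which Python A returns: every row must be at least as long as the
-- matrix height, otherwise A (and B) hit an IndexError while indexing a row.
def Pre_cal_mat (matrix : List String) : Prop :=
  ∀ s ∈ matrix, matrix.length ≤ s.length
instance (matrix : List String) : Decidable (Pre_cal_mat matrix) := by unfold Pre_cal_mat; infer_instance

def pvWitness_cal_mat : List String := ["ab", "cd"]

def Spec_cal_mat (matrix : List String) (out : List String × List String × List String) : Prop := out = cal_mat_alt matrix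
instance (matrix : List String) (out : List String × List String × List String) : Decidable (Spec_cal_mat matrix out) := by unfold Spec_cal_mat; infer_instance

-- ===== CLAIM (what is proved, stated in full; the proofs are below) =====
def Claim_equal_cal_mat : Prop := ∀ (matrix : List String), Dom_cal_mat matrix → Pre_cal_mat matrix → Spec_cal_mat matrix (cal_mat matrix)

-- ===== LEMMAS AND PROOFS =====

theorem foldl_push {α β : Type} (l : List α) (f : α → β) (acc : List β) :
    l.foldl (fun a x => a ++ [f x]) acc = acc ++ l.map f := by
  induction l generalizing acc with
  | nil => simp
  | cons x xs ih => simp [List.foldl, ih]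

theorem map_range_getD {α β : Type} (l : List α) (d : α) (f : α → β) :
    l.map f = (List.range l.length).map (fun j => f (l.getD j d)) := by
  apply List.ext_getElem
  · simp
  · intro j h1 h2
    simp only [List.getElem_map, List.getElem_range]
    rw [List.getD_eq_getElem?_getD, List.getElem?_eq_getElem (by simpa using h1)]
    rfl

theorem rotate_char (m : List String) :
    pvRotate m = (List.range m.length).map
      (fun i => String.ofList ((List.range m.length).map (fun j => pvGetC m (m.length-1-j) i))) := by
  unfold pvRotate
  apply List.map_congr_left
  intro i hi
  congr 1
  rw [map_range_getD m.reverse ""]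
  simp only [List.length_reverse]
  apply List.map_congr_left
  intro j hj
  simp only [List.mem_range] at hj
  have : m.reverse.getD j "" = m.getD (m.length-1-j) "" := by
    rw [List.getD_eq_getElem?_getD, List.getD_eq_getElem?_getD,
        List.getElem?_eq_getElem (by simpa using hj),
        List.getElem?_eq_getElem (by omega)]
    simp [List.getElem_reverse]
  rw [this]
  simp [pvGetC]

theorem rotate_length (m : List String) : (pvRotate m).length = m.length := by
  simp [pvRotate]

theorem rotate_entry (m : List String) (r c : Nat) (hr : r < m.length) (hc : c < m.length) :
    pvGetC (pvRotate m) r c = pvGetC m (m.length-1-c) r := by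
  unfold pvGetC
  rw [rotate_char]
  have h1 : ((List.range m.length).map
      (fun i => String.ofList ((List.range m.length).map (fun j => pvGetC m (m.length-1-j) i)))).getD r ""
      = String.ofList ((List.range m.length).map (fun j => pvGetC m (m.length-1-j) r)) := by
    rw [List.getD_eq_getElem?_getD, List.getElem?_eq_getElem (by simpa using hr)]
    simp
  rw [h1]
  rw [String.toList_ofList, List.getD_eq_getElem?_getD, List.getElem?_eq_getElem (by simpa using hc)]
  simp [pvGetC, List.getD_eq_getElem?_getD]

theorem cal_mat_spec : Claim_equal_cal_mat := by
  intro matrix _ _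
  unfold Spec_cal_mat cal_mat cal_mat_alt
  simp only [foldl_push, List.nil_append]
  set n := matrix.length with hn
  have h90 : pvRotate matrix = (List.range n).map
      (fun i => String.ofList ((List.range n).map (fun j => pvGetC matrix (n-1-j) i))) :=
    rotate_char matrix
  have len90 : (pvRotate matrix).length = n := rotate_length matrix
  have e90 : ∀ r c, r < n → c < n →
      pvGetC (pvRotate matrix) r c = pvGetC matrix (n-1-c) r := by
    intro r c hr hc
    exact rotate_entry matrix r c (by omega) (by omega)
  -- 180
  have h180 : pvRotate (pvRotate matrix) = (List.range n).map
      (fun i => String.ofList ((List.range n).map (fun j => pvGetC matrix (n-1-i) (n-1-j)))) := by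
    rw [rotate_char, len90]
    apply List.map_congr_left
    intro i hi
    simp only [List.mem_range] at hi
    congr 1
    apply List.map_congr_left
    intro j hj
    simp only [List.mem_range] at hj
    rw [e90 (n-1-j) i (by omega) hi]
  have len180 : (pvRotate (pvRotate matrix)).length = n := by
    rw [rotate_length, len90]
  have e180 : ∀ r c, r < n → c < n →
      pvGetC (pvRotate (pvRotate matrix)) r c = pvGetC matrix (n-1-r) (n-1-c) := by
    intro r c hr hc
    rw [show pvGetC (pvRotate (pvRotate matrix)) r c
        = pvGetC (pvRotate matrix) ((pvRotate matrix).length-1-c) r from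
      rotate_entry (pvRotate matrix) r c (by omega) (by omega)]
    rw [len90, e90 (n-1-c) r (by omega) hr]
  -- 270
  have h270 : pvRotate (pvRotate (pvRotate matrix)) = (List.range n).map
      (fun i => String.ofList ((List.range n).map (fun j => pvGetC matrix j (n-1-i)))) := by
    rw [rotate_char, len180]
    apply List.map_congr_left
    intro i hi
    simp only [List.mem_range] at hi
    congr 1
    apply List.map_congr_left
    intro j hj
    simp only [List.mem_range] at hj
    rw [e180 (n-1-j) i (by omega) hi]
    congr 1
    omega
  refine Prod.ext ?_ (Prod.ext ?_ ?_) <;> simp only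
  · exact h90.symm
  · exact h180.symm
  · exact h270.symm
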